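-- pv_equiv track=rewrite | github.com/Middleware-NoSQL/PolyFuseQL | polyfuseql/utils/utils.py | _camelize
-- ===== SOURCE A (Python) =====
-- def _camelize(name: str) -> str:
--     """Convert snake_case to camelCase (naïve)."""
--     result = ""
--     upper_next = False
--     for ch in name:
--         if ch == "_":
--             upper_next = True  # skip the underscore, raise flag
--             continue
--         if upper_next:
--             result += ch.upper()
--             upper_next = False
--         else:
--             result += ch
--     return result
-- ===== SOURCE B (Python) =====
-- def _camelize(name: str) -> str:
--     """Convert snake_case to camelCase via token splitting."""
--     parts = name.split('_')
--     return parts[0] + ''.join(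
--         p[0].upper() + p[1:] if p else '' for p in parts[1:]
--     )
-- ===== Notes on version B (the rewrite author's own statement) =====
-- stated objective: faster
-- what changed: Replaced the char-by-char flag loop that grows the result with repeated string concatenation by a single underscore-split into tokens, capitalising the first character of each non-empty token after the first and joining once.
import Mathlib
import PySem

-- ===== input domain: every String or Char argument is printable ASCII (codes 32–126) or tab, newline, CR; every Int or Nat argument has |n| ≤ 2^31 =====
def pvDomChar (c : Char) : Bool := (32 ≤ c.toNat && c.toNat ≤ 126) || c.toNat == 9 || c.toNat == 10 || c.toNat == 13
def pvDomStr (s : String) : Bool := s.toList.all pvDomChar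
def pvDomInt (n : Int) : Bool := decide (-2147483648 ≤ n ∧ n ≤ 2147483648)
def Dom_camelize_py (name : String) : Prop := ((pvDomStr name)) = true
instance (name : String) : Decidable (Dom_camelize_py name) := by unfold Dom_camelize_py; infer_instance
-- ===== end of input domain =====

-- B replaces A's char-by-char flag loop with split('_') + capitalise-and-join (idiomatic).

-- ===== PORT A =====
-- result accumulated as a List Char (Python's `result += ch`); flag `upper_next` threaded as in A.
def camelize_py (name : String) : String :=
  let step : (List Char × Bool) → Char → (List Char × Bool) := fun st ch =>
    if ch = '_' then (st.1, true)
    else if st.2 then (st.1 ++ [PySem.Chars.upperChar ch], false)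
    else (st.1 ++ [ch], false)
  String.mk (name.toList.foldl step ([], false)).1

-- ===== PORT B =====
-- `p[0].upper() + p[1:] if p else ''` for one token
def camelizeCap (p : List Char) : List Char :=
  match p with
  | [] => []
  | c :: t => PySem.Chars.upperChar c :: t

def camelize_py_alt (name : String) : String :=
  let parts := PySem.Chars.splitOn name.toList ['_']
  match parts with
  | [] => ""  -- unreachable: str.split never returns an empty list
  | h :: t => String.mk (h ++ (t.map camelizeCap).flatten)

-- ===== PRECONDITION & SPEC =====
def Spec_camelize_py (name : String) (out : String) : Prop := out = camelize_py_alt name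
instance (name : String) (out : String) : Decidable (Spec_camelize_py name out) := by unfold Spec_camelize_py; infer_instance

-- ===== CLAIM (what is proved, stated in full; the proofs are below) =====
def Claim_equal_camelize_py : Prop := ∀ (name : String), Dom_camelize_py name → Spec_camelize_py name (camelize_py name)

-- ===== LEMMAS AND PROOFS =====

-- recursive form of A's loop (proof helper)
def camelizeRunA (f : Bool) : List Char → List Char
  | [] => []
  | c :: t =>
      if c = '_' then camelizeRunA true t
      else (if f then PySem.Chars.upperChar c else c) :: camelizeRunA false t

-- split on '_' into (first token, remaining tokens) (proof helper)
def camelizeSplitU : List Char → List Char × List (List Char)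
  | [] => ([], [])
  | c :: t =>
      let r := camelizeSplitU t
      if c = '_' then ([], r.1 :: r.2) else (c :: r.1, r.2)

lemma camelize_foldl_eq_runA (l : List Char) (acc : List Char) (f : Bool) :
    (l.foldl (fun (st : List Char × Bool) ch =>
      if ch = '_' then (st.1, true)
      else if st.2 then (st.1 ++ [PySem.Chars.upperChar ch], false)
      else (st.1 ++ [ch], false)) (acc, f)).1 = acc ++ camelizeRunA f l := by
  induction l generalizing acc f with
  | nil => simp [camelizeRunA]
  | cons c t ih =>
      by_cases hc : c = '_'
      · simp [List.foldl, hc, camelizeRunA, ih]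
      · cases f <;> simp [List.foldl, hc, camelizeRunA, ih]

lemma camelize_go_spec (fuel : Nat) (l cur : List Char) (acc : List (List Char))
    (h : l.length < fuel) :
    PySem.Chars.splitOn.go ['_'] fuel l cur acc =
      acc.reverse ++ (cur.reverse ++ (camelizeSplitU l).1) :: (camelizeSplitU l).2 := by
  induction fuel generalizing l cur acc with
  | zero => omega
  | succ f ih =>
      cases l with
      | nil => simp [PySem.Chars.splitOn.go, camelizeSplitU]
      | cons c t =>
          by_cases hc : c = '_'
          · subst hc
            rw [PySem.Chars.splitOn.go]
            have hpre : List.isPrefixOf ['_'] ('_' :: t) = true := by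
              simp [List.isPrefixOf]
            simp only [hpre, if_true, List.length_cons, List.length_nil,
              List.drop_succ_cons, List.drop_zero]
            rw [ih t [] (cur.reverse :: acc) (by simpa using Nat.lt_of_succ_lt_succ h)]
            simp [camelizeSplitU]
          · rw [PySem.Chars.splitOn.go]
            have hpre : List.isPrefixOf ['_'] (c :: t) = false := by
              simp [List.isPrefixOf]; exact fun e => hc e.symm
            simp only [hpre, Bool.false_eq_true, if_false]
            rw [ih t (c :: cur) acc (by simpa using Nat.lt_of_succ_lt_succ h)]
            simp [camelizeSplitU, hc]

lemma camelize_splitOn_eq (l : List Char) :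
    PySem.Chars.splitOn l ['_'] = (camelizeSplitU l).1 :: (camelizeSplitU l).2 := by
  unfold PySem.Chars.splitOn
  rw [camelize_go_spec (l.length + 1) l [] [] (by omega)]
  simp

lemma camelize_runA_eq_split (l : List Char) :
    camelizeRunA false l =
      (camelizeSplitU l).1 ++ (((camelizeSplitU l).2.map camelizeCap).flatten) ∧
    camelizeRunA true l =
      camelizeCap (camelizeSplitU l).1 ++ (((camelizeSplitU l).2.map camelizeCap).flatten) := by
  induction l with
  | nil => simp [camelizeRunA, camelizeSplitU, camelizeCap]
  | cons c t ih =>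
      by_cases hc : c = '_'
      · subst hc
        constructor <;>
          simp [camelizeRunA, camelizeSplitU, camelizeCap, ih.2]
      · constructor <;>
          simp [camelizeRunA, camelizeSplitU, camelizeCap, hc, ih.1]

-- ===== VERDICT (by name: the statement is the Claim_ definition above) =====
theorem camelize_py_spec : Claim_equal_camelize_py := by
  intro name _
  unfold Spec_camelize_py camelize_py camelize_py_alt
  rw [camelize_splitOn_eq]
  simp only
  rw [camelize_foldl_eq_runA name.toList [] false]
  rw [(camelize_runA_eq_split name.toList).1]
  simp
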